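-- pv_equiv track=rewrite | github.com/anzeyimana/DeepKIN | scripts/classification_regression/classification_regression_data_util.py | cls_reg_data_collate_wrapper
-- ===== SOURCE A (Python) =====
-- def cls_reg_data_collate_wrapper(batch_items):
--     batch_lm_morphs = []
--     batch_pos_tags = []
--     batch_affixes = []
--     batch_tokens_lengths = []
--     batch_stems = []
--
--     batch_input_sequence_lengths = []
--     batch_labels = []
--
--     for bidx,data_item in enumerate(batch_items):
--         (label,
--          details) = data_item
--         (seq_lm_morphs,
--          seq_pos_tags,
--          seq_affixes,
--          seq_tokens_lengths,
--          seq_stems) = details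
--
--         if label is not None:
--             batch_labels.append(label)
--
--         batch_lm_morphs.extend(seq_lm_morphs)
--         batch_pos_tags.extend(seq_pos_tags)
--         batch_affixes.extend(seq_affixes)
--         batch_tokens_lengths.extend(seq_tokens_lengths)
--         batch_stems.extend(seq_stems)
--
--         batch_input_sequence_lengths.append(len(seq_tokens_lengths))
--
--     data_item = (batch_labels,
--                  (batch_lm_morphs,
--                  batch_pos_tags,
--                  batch_affixes,
--                  batch_tokens_lengths,
--                  batch_stems,
--                  batch_input_sequence_lengths))
--     return data_item
-- ===== SOURCE B (Python) =====
-- def cls_reg_data_collate_wrapper(batch_items):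
--     if not batch_items:
--         return ([], ([], [], [], [], [], []))
--     labels, details = zip(*batch_items)
--     lm, pos, aff, tl, stems = zip(*details)
--     return ([l for l in labels if l is not None],
--             ([x for seq in lm for x in seq],
--              [x for seq in pos for x in seq],
--              [x for seq in aff for x in seq],
--              [x for seq in tl for x in seq],
--              [x for seq in stems for x in seq],
--              [len(t) for t in tl]))
-- ===== Notes on version B (the rewrite author's own statement) =====
-- stated objective: idiomatic
-- what changed: Replaces the single accumulator loop mutating seven lists with a transpose-first decomposition: unpack columns via zip(*...), then build each output list independently by a comprehension.
import Mathlib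
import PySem

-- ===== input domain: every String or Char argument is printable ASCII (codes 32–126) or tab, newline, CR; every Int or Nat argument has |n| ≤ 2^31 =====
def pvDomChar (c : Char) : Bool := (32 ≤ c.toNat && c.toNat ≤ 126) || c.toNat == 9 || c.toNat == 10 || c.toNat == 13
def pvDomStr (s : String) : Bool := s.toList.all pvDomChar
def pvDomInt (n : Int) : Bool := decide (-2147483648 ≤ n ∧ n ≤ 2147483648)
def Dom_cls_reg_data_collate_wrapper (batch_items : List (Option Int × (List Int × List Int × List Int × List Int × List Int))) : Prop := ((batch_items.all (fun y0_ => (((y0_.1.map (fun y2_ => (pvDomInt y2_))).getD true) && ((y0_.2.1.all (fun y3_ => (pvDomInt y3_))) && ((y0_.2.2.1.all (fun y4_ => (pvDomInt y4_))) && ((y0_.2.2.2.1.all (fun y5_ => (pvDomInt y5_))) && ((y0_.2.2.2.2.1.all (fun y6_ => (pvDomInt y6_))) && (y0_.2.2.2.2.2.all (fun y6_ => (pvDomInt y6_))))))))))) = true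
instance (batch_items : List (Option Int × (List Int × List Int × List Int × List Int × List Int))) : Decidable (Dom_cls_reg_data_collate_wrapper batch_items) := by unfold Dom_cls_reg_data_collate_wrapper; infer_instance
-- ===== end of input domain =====

-- B replaces A's single accumulating loop with a transpose-first decomposition (idiomatic; same cost).
-- ===== PORT A =====
-- literal port of A: one fold over the batch carrying all seven accumulator lists
def cls_reg_data_collate_wrapper (batch_items : List (Option Int × (List Int × List Int × List Int × List Int × List Int))) : List Int × (List Int × List Int × List Int × List Int × List Int × List Int) :=
  let st := batch_items.foldl
    (fun (st : List Int × List Int × List Int × List Int × List Int × List Int × List Int) data_item =>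
      let (label, details) := data_item
      let (seq_lm_morphs, seq_pos_tags, seq_affixes, seq_tokens_lengths, seq_stems) := details
      let (bl, blm, bpt, baf, btl, bst, bisl) := st
      let bl := match label with | some l => bl ++ [l] | none => bl
      (bl, blm ++ seq_lm_morphs, bpt ++ seq_pos_tags, baf ++ seq_affixes,
       btl ++ seq_tokens_lengths, bst ++ seq_stems, bisl ++ [(seq_tokens_lengths.length : Int)]))
    ([], [], [], [], [], [], [])
  (st.1, (st.2.1, st.2.2.1, st.2.2.2.1, st.2.2.2.2.1, st.2.2.2.2.2.1, st.2.2.2.2.2.2))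

-- ===== PORT B =====
-- literal port of B: transpose the batch into columns, then build each output list independently
def cls_reg_data_collate_wrapper_alt (batch_items : List (Option Int × (List Int × List Int × List Int × List Int × List Int))) : List Int × (List Int × List Int × List Int × List Int × List Int × List Int) :=
  match batch_items with
  | [] => ([], ([], [], [], [], [], []))
  | _ =>
    let labels := batch_items.map Prod.fst
    let details := batch_items.map Prod.snd
    (labels.filterMap id,
     (details.flatMap (fun d => d.1),
      details.flatMap (fun d => d.2.1),
      details.flatMap (fun d => d.2.2.1),
      details.flatMap (fun d => d.2.2.2.1),
      details.flatMap (fun d => d.2.2.2.2),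
      details.map (fun d => (d.2.2.2.1.length : Int))))

-- hand-built DecidableEq for the deeply nested product output type (instance search hits its depth limit)
def pvDec5 : DecidableEq (List Int × List Int × List Int × List Int × List Int) := instDecidableEqProd
def pvDec7 : DecidableEq (List Int × (List Int × List Int × List Int × List Int × List Int × List Int)) := @instDecidableEqProd _ _ _ (@instDecidableEqProd _ _ _ pvDec5)

-- ===== PRECONDITION & SPEC =====
def Spec_cls_reg_data_collate_wrapper (batch_items : List (Option Int × (List Int × List Int × List Int × List Int × List Int))) (out : List Int × (List Int × List Int × List Int × List Int × List Int × List Int)) : Prop := out = cls_reg_data_collate_wrapper_alt batch_items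
instance (batch_items : List (Option Int × (List Int × List Int × List Int × List Int × List Int))) (out : List Int × (List Int × List Int × List Int × List Int × List Int × List Int)) : Decidable (Spec_cls_reg_data_collate_wrapper batch_items out) := by unfold Spec_cls_reg_data_collate_wrapper; exact pvDec7 _ _

-- ===== CLAIM (what is proved, stated in full; the proofs are below) =====
def Claim_equal_cls_reg_data_collate_wrapper : Prop := ∀ (batch_items : List (Option Int × (List Int × List Int × List Int × List Int × List Int))), Dom_cls_reg_data_collate_wrapper batch_items → Spec_cls_reg_data_collate_wrapper batch_items (cls_reg_data_collate_wrapper batch_items)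

-- ===== LEMMAS AND PROOFS =====

-- invariant of A's fold: the seven accumulators are the prefixes of the seven column outputs
theorem pv_fold_inv (l : List (Option Int × (List Int × List Int × List Int × List Int × List Int)))
    (bl blm bpt baf btl bst bisl : List Int) :
    l.foldl
      (fun (st : List Int × List Int × List Int × List Int × List Int × List Int × List Int) data_item =>
        let (label, details) := data_item
        let (seq_lm_morphs, seq_pos_tags, seq_affixes, seq_tokens_lengths, seq_stems) := details
        let (bl, blm, bpt, baf, btl, bst, bisl) := st
        let bl := match label with | some l => bl ++ [l] | none => bl
        (bl, blm ++ seq_lm_morphs, bpt ++ seq_pos_tags, baf ++ seq_affixes,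
         btl ++ seq_tokens_lengths, bst ++ seq_stems, bisl ++ [(seq_tokens_lengths.length : Int)]))
      (bl, blm, bpt, baf, btl, bst, bisl)
    = (bl ++ l.filterMap Prod.fst,
       blm ++ l.flatMap (fun d => d.2.1),
       bpt ++ l.flatMap (fun d => d.2.2.1),
       baf ++ l.flatMap (fun d => d.2.2.2.1),
       btl ++ l.flatMap (fun d => d.2.2.2.2.1),
       bst ++ l.flatMap (fun d => d.2.2.2.2.2),
       bisl ++ l.map (fun d => (d.2.2.2.2.1.length : Int))) := by
  induction l generalizing bl blm bpt baf btl bst bisl with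
  | nil => simp
  | cons h t ih =>
    obtain ⟨label, lm, pt, af, tl, st⟩ := h
    cases label <;> simp [ih]

-- ===== VERDICT (by name: the statement is the Claim_ definition above) =====
theorem cls_reg_data_collate_wrapper_spec : Claim_equal_cls_reg_data_collate_wrapper := by
  intro batch_items _
  show cls_reg_data_collate_wrapper batch_items = cls_reg_data_collate_wrapper_alt batch_items
  cases batch_items with
  | nil => rfl
  | cons h t =>
    simp only [cls_reg_data_collate_wrapper, cls_reg_data_collate_wrapper_alt, pv_fold_inv]
    simp [List.filterMap_map, List.flatMap_map, Function.comp]
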